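-- pv_equiv track=rewrite | github.com/gxmls/Python_NOI | NOI1-5-25.py | Neuf
-- ===== SOURCE A (Python) =====
-- def Neuf(sn): #把十进制整数sn转换成九进制dn
--     s9=''
--     while sn//9!=0:
--         s9+=str(sn%9)
--         sn//=9
--     s9+=str(sn%9)
--     dn=int(s9[::-1])
--     return dn
-- ===== SOURCE B (Python) =====
-- def Neuf(sn):
--     # accumulate the decimal result directly by place value (no string, no int())
--     dn = 0
--     mult = 1
--     while True:
--         dn += (sn % 9) * mult
--         mult *= 10
--         sn //= 9
--         if sn == 0:
--             break
--     return dn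
-- ===== Notes on version B (the rewrite author's own statement) =====
-- stated objective: idiomatic
-- what changed: B drops the digit string entirely: instead of appending str(sn%9) characters, reversing the string and re-parsing it with int(), it accumulates the decimal result arithmetically with a place-value multiplier (dn += digit*mult; mult *= 10) in a do-while loop.
import Mathlib
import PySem

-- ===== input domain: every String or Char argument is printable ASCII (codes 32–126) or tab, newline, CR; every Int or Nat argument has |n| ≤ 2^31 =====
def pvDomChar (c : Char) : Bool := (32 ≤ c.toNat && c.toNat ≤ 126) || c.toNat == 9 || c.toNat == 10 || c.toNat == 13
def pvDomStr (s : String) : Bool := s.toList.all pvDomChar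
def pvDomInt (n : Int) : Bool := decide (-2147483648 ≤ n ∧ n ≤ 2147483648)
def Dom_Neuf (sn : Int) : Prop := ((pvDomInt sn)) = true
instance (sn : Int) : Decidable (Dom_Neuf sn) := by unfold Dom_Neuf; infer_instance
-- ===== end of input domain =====

-- B replaces A's build-a-reversed-digit-string-then-int() with direct arithmetic
-- place-value accumulation (idiomatic; same asymptotics).

-- ===== PORT A =====
-- while sn//9 != 0: s9 += str(sn%9); sn //= 9     (fuel only makes the loop total;
-- for the sn admitted by Pre_ the fuel is never exhausted)
def neufLoopA : Nat → Int → List Char → Int × List Char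
  | 0, sn, s9 => (sn, s9)
  | fuel+1, sn, s9 =>
    if PySem.Int.floordiv sn 9 ≠ 0 then
      neufLoopA fuel (PySem.Int.floordiv sn 9) (s9 ++ PySem.Int.toChars (PySem.Int.mod sn 9))
    else (sn, s9)

-- int(cs): hand-ported decimal evaluation; exact on the nonempty '0'..'8' digit
-- strings A builds for every sn admitted by Pre_ (no sign/space/underscore occurs there)
def decInt (cs : List Char) : Int :=
  cs.foldl (fun a c => a * 10 + ((c.toNat : Int) - 48)) 0

def Neuf (sn : Int) : Int :=
  let p := neufLoopA (sn.natAbs + 1) sn []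
  let s9 := p.2 ++ PySem.Int.toChars (PySem.Int.mod p.1 9)
  decInt ((PySem.List.slice? s9 none none (-1)).getD [])  -- s9[::-1]

-- ===== PORT B =====
-- do-while: dn += (sn%9)*mult; mult *= 10; sn //= 9; break when sn == 0
def neufLoopB : Nat → Int → Int → Int → Int
  | 0, _, dn, _ => dn
  | fuel+1, sn, dn, mult =>
    let dn' := dn + PySem.Int.mod sn 9 * mult
    let mult' := mult * 10
    let sn' := PySem.Int.floordiv sn 9
    if sn' = 0 then dn' else neufLoopB fuel sn' dn' mult'

def Neuf_alt (sn : Int) : Int := neufLoopB (sn.natAbs + 1) sn 0 1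

-- ===== PRECONDITION & SPEC =====
-- A's while loop never terminates for negative sn (sn//9 floors, so sn stays -1 forever):
-- A returns on exactly the nonnegative integers.
def Pre_Neuf (sn : Int) : Prop := 0 ≤ sn
instance (sn : Int) : Decidable (Pre_Neuf sn) := by unfold Pre_Neuf; infer_instance
def pvWitness_Neuf : Int := (59)

def Spec_Neuf (sn : Int) (out : Int) : Prop := out = Neuf_alt sn
instance (sn : Int) (out : Int) : Decidable (Spec_Neuf sn out) := by unfold Spec_Neuf; infer_instance

-- ===== CLAIM (what is proved, stated in full; the proofs are below) =====
def Claim_equal_Neuf : Prop := ∀ (sn : Int), Dom_Neuf sn → Pre_Neuf sn → Spec_Neuf sn (Neuf sn)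

-- ===== LEMMAS AND PROOFS =====

-- the decimal number whose digits (most significant first) are the base-9 digits of sn
def N9 (sn : Int) : Int :=
  if sn < 9 then sn else N9 (sn / 9) * 10 + sn % 9
termination_by sn.toNat
decreasing_by omega

-- the residual value when A's loop stops (the leading base-9 digit)
def fin9 (sn : Int) : Int :=
  if sn < 9 then sn else fin9 (sn / 9)
termination_by sn.toNat
decreasing_by omega

-- the characters A's loop appends (little-endian digits except the leading one)
def tail9 (sn : Int) : List Char :=
  if sn < 9 then [] else PySem.Int.toChars (sn % 9) ++ tail9 (sn / 9)
termination_by sn.toNat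
decreasing_by omega

theorem charToNat (n : Nat) (h : n < 55296) : (Char.ofNat n).toNat = n := by
  unfold Char.ofNat
  split
  · rfl
  · next hv => exact absurd (by constructor; omega) hv

theorem fdiv9 (a : Int) : PySem.Int.floordiv a 9 = a / 9 := by
  simp [PySem.Int.floordiv, Int.fdiv_eq_ediv]

theorem fmod9 (a : Int) : PySem.Int.mod a 9 = a % 9 := by
  simp [PySem.Int.mod, Int.fmod_eq_emod]

theorem digitChar (d : Int) (h0 : 0 ≤ d) (h9 : d < 9) :
    PySem.Int.toChars d = [Char.ofNat (d.toNat + 48)] := by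
  interval_cases d <;> decide

theorem decInt_append_one (xs : List Char) (c : Char) :
    decInt (xs ++ [c]) = decInt xs * 10 + ((c.toNat : Int) - 48) := by
  simp [decInt, List.foldl_append]

theorem fin9_bounds : ∀ (fuel : Nat) (sn : Int), 0 ≤ sn → sn.toNat < fuel →
    0 ≤ fin9 sn ∧ fin9 sn < 9 := by
  intro fuel
  induction fuel with
  | zero => intro sn h hf; omega
  | succ n ih =>
    intro sn h hf
    rw [fin9]
    by_cases hlt : sn < 9
    · simp [hlt]; omega
    · simp [hlt]
      exact ih (sn / 9) (by omega) (by omega)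

theorem loopB_eq : ∀ (fuel : Nat) (sn dn mult : Int), 0 ≤ sn → sn.toNat < fuel →
    neufLoopB fuel sn dn mult = dn + N9 sn * mult := by
  intro fuel
  induction fuel with
  | zero => intro sn dn mult h hf; omega
  | succ n ih =>
    intro sn dn mult h hf
    simp only [neufLoopB, fdiv9, fmod9]
    by_cases hz : sn / 9 = 0
    · have hlt : sn < 9 := by omega
      rw [if_pos hz, N9, if_pos hlt]
      have : sn % 9 = sn := by omega
      rw [this]
    · rw [if_neg hz, ih (sn / 9) _ _ (by omega) (by omega)]
      conv_rhs => rw [N9]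
      rw [if_neg (by omega : ¬ sn < 9)]
      ring

theorem loopA_eq : ∀ (fuel : Nat) (sn : Int) (s9 : List Char), 0 ≤ sn → sn.toNat < fuel →
    neufLoopA fuel sn s9 = (fin9 sn, s9 ++ tail9 sn) := by
  intro fuel
  induction fuel with
  | zero => intro sn s9 h hf; omega
  | succ n ih =>
    intro sn s9 h hf
    simp only [neufLoopA, fdiv9, fmod9]
    by_cases hz : sn / 9 = 0
    · have hlt : sn < 9 := by omega
      simp only [hz, ne_eq, not_true_eq_false, if_false]
      rw [fin9, if_pos hlt, tail9, if_pos hlt, List.append_nil]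
    · have h9 : ¬ sn < 9 := by omega
      simp only [ne_eq, hz, not_false_eq_true, if_true]
      rw [ih (sn / 9) _ (by omega) (by omega)]
      conv_rhs => rw [fin9, if_neg h9, tail9, if_neg h9]
      simp [List.append_assoc]

theorem value_eq : ∀ (fuel : Nat) (sn : Int), 0 ≤ sn → sn.toNat < fuel →
    decInt ((tail9 sn ++ PySem.Int.toChars (fin9 sn)).reverse) = N9 sn := by
  intro fuel
  induction fuel with
  | zero => intro sn h hf; omega
  | succ n ih =>
    intro sn h hf
    by_cases hlt : sn < 9
    · rw [tail9, if_pos hlt, fin9, if_pos hlt, N9, if_pos hlt]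
      rw [digitChar sn h hlt]
      simp only [List.nil_append, List.reverse_singleton, decInt, List.foldl]
      rw [charToNat _ (by omega)]
      omega
    · rw [tail9, if_neg hlt, fin9, if_neg hlt, N9, if_neg hlt]
      have hmod9 : PySem.Int.toChars (sn % 9) = [Char.ofNat ((sn % 9).toNat + 48)] := by
        apply digitChar <;> omega
      rw [hmod9]
      have : (([Char.ofNat ((sn % 9).toNat + 48)] ++ tail9 (sn / 9)) ++
              PySem.Int.toChars (fin9 (sn / 9))).reverse =
             (tail9 (sn / 9) ++ PySem.Int.toChars (fin9 (sn / 9))).reverse ++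
              [Char.ofNat ((sn % 9).toNat + 48)] := by
        simp [List.append_assoc]
      rw [this, decInt_append_one, ih (sn / 9) (by omega) (by omega)]
      have hc : ((Char.ofNat ((sn % 9).toNat + 48)).toNat : Int) - 48 = sn % 9 := by
        rw [charToNat _ (by omega)]
        omega
      rw [hc]

-- ===== VERDICT (by name: the statement is the Claim_ definition above) =====
theorem Neuf_spec : Claim_equal_Neuf := by
  intro sn _ hpre
  unfold Spec_Neuf Neuf Neuf_alt
  have hf : sn.toNat < sn.natAbs + 1 := by omega
  rw [loopA_eq _ sn [] hpre hf, loopB_eq _ sn 0 1 hpre hf]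
  simp only [PySem.List.slice?_none_none_neg_one, Option.getD_some, List.nil_append]
  have hb := fin9_bounds _ sn hpre hf
  have hmod : PySem.Int.mod (fin9 sn) 9 = fin9 sn := by rw [fmod9]; omega
  rw [hmod, value_eq _ sn hpre hf]
  ring
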